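-- pv_equiv track=rewrite | github.com/sua-kim/Algorithm | Programmers/[찾아라 프로그래밍 마에스터] 폰켓몬.py | solution
-- ===== SOURCE A (Python) =====
-- def solution(nums):
--     answer = 0
--     type = []
--     for i in nums:
--         if len(type) >= len(nums)/2:
--             break;
--         if i not in type:
--             type.append(i)
--     answer = len(type)
--     return answer
-- ===== SOURCE B (Python) =====
-- def solution(nums):
--     s = sorted(nums)
--     count = 0
--     prev = None
--     for x in s:
--         if prev is None or x != prev:
--             count += 1
--         prev = x
--     return min(count, (len(nums) + 1) // 2)
-- ===== Notes on version B (the rewrite author's own statement) =====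
-- stated objective: faster
-- what changed: Replaces A's membership-test accumulation into a growing list (quadratic inner 'in' scan with an early break) by sort-then-adjacency-scan: sort the list, count a value when it differs from its predecessor, and cap with min(count, ceil(n/2)).
import Mathlib
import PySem

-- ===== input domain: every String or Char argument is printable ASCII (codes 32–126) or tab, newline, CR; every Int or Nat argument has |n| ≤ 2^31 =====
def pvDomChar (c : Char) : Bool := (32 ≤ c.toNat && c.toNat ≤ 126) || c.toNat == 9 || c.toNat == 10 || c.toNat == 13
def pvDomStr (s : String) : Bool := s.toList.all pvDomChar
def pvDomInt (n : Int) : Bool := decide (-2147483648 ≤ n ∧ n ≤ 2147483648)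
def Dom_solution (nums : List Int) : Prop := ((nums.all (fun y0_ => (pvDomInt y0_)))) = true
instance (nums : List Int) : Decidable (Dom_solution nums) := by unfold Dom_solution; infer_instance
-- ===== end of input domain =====

-- B replaces A's membership-test accumulation (quadratic) by sort-then-adjacency-scan with a min(count, ceil(n/2)) cap (objective: faster).

-- ===== PORT A =====
-- the for-loop over nums with the growing 'type' list and the early break;
-- 'len(type) >= len(nums)/2' (int vs exact float half) is ported exactly as 2*len(type) ≥ len(nums)
def solutionGo (n : Nat) : List Int → List Int → List Int
  | [], t => t
  | i :: rest, t =>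
    if 2 * t.length ≥ n then t
    else if i ∈ t then solutionGo n rest t
    else solutionGo n rest (t ++ [i])

def solution (nums : List Int) : Int :=
  ((solutionGo nums.length nums []).length : Int)

-- ===== PORT B =====
def solution_alt (nums : List Int) : Int :=
  let s := PySem.List.sorted nums (fun x => x) false
  let r := s.foldl (fun (st : Int × Option Int) x =>
    (if st.2 = none ∨ some x ≠ st.2 then st.1 + 1 else st.1, some x)) (0, none)
  min r.1 (PySem.Int.floordiv ((nums.length : Int) + 1) 2)

-- ===== PRECONDITION & SPEC =====
def Spec_solution (nums : List Int) (out : Int) : Prop := out = solution_alt nums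
instance (nums : List Int) (out : Int) : Decidable (Spec_solution nums out) := by unfold Spec_solution; infer_instance

-- ===== CLAIM (what is proved, stated in full; the proofs are below) =====
def Claim_equal_solution : Prop := ∀ (nums : List Int), Dom_solution nums → Spec_solution nums (solution nums)

-- ===== LEMMAS AND PROOFS =====

-- A's loop computes min(cap, |t| + #(distinct of r outside t))
theorem solutionGo_len (n : Nat) (r : List Int) : ∀ t : List Int, t.length ≤ (n + 1) / 2 →
    (solutionGo n r t).length = min ((n + 1) / 2) (t.length + (r.toFinset \ t.toFinset).card) := by
  induction r with
  | nil => intro t ht; simp [solutionGo]; omega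
  | cons i rest ih =>
    intro t ht
    by_cases hb : 2 * t.length ≥ n
    · rw [show solutionGo n (i :: rest) t = t by simp only [solutionGo, if_pos hb]]
      omega
    · have hlt : t.length < (n + 1) / 2 := by omega
      by_cases hm : i ∈ t
      · have : ((i :: rest).toFinset \ t.toFinset : Finset Int) = rest.toFinset \ t.toFinset := by
          ext x
          simp only [Finset.mem_sdiff, List.mem_toFinset, List.mem_cons]
          constructor
          · rintro ⟨h1 | h1, h2⟩
            · exact absurd (h1 ▸ hm) h2
            · exact ⟨h1, h2⟩
          · rintro ⟨h1, h2⟩; exact ⟨Or.inr h1, h2⟩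
        rw [show solutionGo n (i :: rest) t = solutionGo n rest t by simp [solutionGo, hb, hm],
          this]
        exact ih t ht
      · have hset : ((i :: rest).toFinset \ t.toFinset : Finset Int)
            = insert i (rest.toFinset \ (t ++ [i]).toFinset) := by
          ext x
          simp only [Finset.mem_sdiff, List.mem_toFinset, List.mem_cons, Finset.mem_insert,
            List.mem_append]
          constructor
          · rintro ⟨h1 | h1, h2⟩
            · exact Or.inl h1
            · by_cases hx : x = i
              · exact Or.inl hx
              · exact Or.inr ⟨h1, by tauto⟩
          · rintro (h1 | ⟨h1, h2⟩)
            · exact ⟨Or.inl h1, by rwa [h1]⟩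
            · exact ⟨Or.inr h1, fun hxt => h2 (Or.inl hxt)⟩
        have hni : i ∉ (rest.toFinset \ (t ++ [i]).toFinset : Finset Int) := by
          simp
        rw [show solutionGo n (i :: rest) t = solutionGo n rest (t ++ [i]) by
            simp [solutionGo, hb, hm],
          ih (t ++ [i]) (by simp; omega), hset, Finset.card_insert_of_notMem hni]
        simp
        omega

-- B's scan: with all remaining elements ≥ prev the count of adjacency-new values
-- is the number of distinct values not equal to prev
theorem solutionFold_count (l : List Int) : ∀ (c : Int) (p : Option Int),
    l.Pairwise (· ≤ ·) → (∀ m, p = some m → ∀ y ∈ l, m ≤ y) →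
    (l.foldl (fun (st : Int × Option Int) x =>
      (if st.2 = none ∨ some x ≠ st.2 then st.1 + 1 else st.1, some x)) (c, p)).1
      = c + ((l.toFinset \ (match p with | none => (∅ : Finset Int) | some m => {m})).card : Int) := by
  induction l with
  | nil => intro c p _ _; simp
  | cons x xs ih =>
    intro c p hpw hp
    have hxs : xs.Pairwise (· ≤ ·) := hpw.tail
    have hxle : ∀ y ∈ xs, x ≤ y := fun y hy => (List.pairwise_cons.mp hpw).1 y hy
    have step : ∀ c' : Int,
        (xs.foldl (fun (st : Int × Option Int) x =>
          (if st.2 = none ∨ some x ≠ st.2 then st.1 + 1 else st.1, some x)) (c', some x)).1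
          = c' + ((xs.toFinset \ {x}).card : Int) := fun c' =>
      ih c' (some x) hxs (by rintro m hm y hy; cases hm; exact hxle y hy)
    have hins : ∀ S : Finset Int, ((insert x S).card : Int) = 1 + ((S \ {x}).card : Int) := by
      intro S
      rw [show insert x S = insert x (S \ {x}) by
          ext y; by_cases hy : y = x <;> simp [hy],
        Finset.card_insert_of_notMem (by simp)]
      push_cast; ring
    match p with
    | none =>
      rw [List.foldl_cons,
        show (if (((c, (none : Option Int)).2 = none ∨ some x ≠ (c, (none : Option Int)).2)) then (c, (none : Option Int)).1 + 1 else (c, (none : Option Int)).1, some x) = ((c + 1 : Int), some x) from by simp,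
        step]
      have hset : ((x :: xs).toFinset \ (∅ : Finset Int)) = insert x xs.toFinset := by simp
      rw [show (match (none : Option Int) with | none => (∅ : Finset Int) | some m => {m}) = (∅ : Finset Int) from rfl,
        hset, hins]
      ring
    | some m =>
      by_cases hmx : m = x
      · subst hmx
        rw [List.foldl_cons,
        show (if (((c, (some m : Option Int)).2 = none ∨ some m ≠ (c, (some m : Option Int)).2)) then (c, (some m : Option Int)).1 + 1 else (c, (some m : Option Int)).1, some m) = (c, some m) from by simp,
        step]
        have hset : ((m :: xs).toFinset \ ({m} : Finset Int)) = xs.toFinset \ {m} := by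
          ext y; by_cases hy : y = m <;> simp [hy]
        rw [hset]
      · rw [List.foldl_cons,
        show (if (((c, (some m : Option Int)).2 = none ∨ some x ≠ (c, (some m : Option Int)).2)) then (c, (some m : Option Int)).1 + 1 else (c, (some m : Option Int)).1, some x) = ((c + 1 : Int), some x) from by simp [Ne.symm hmx],
        step]
        have hnm : m ∉ ((x :: xs).toFinset : Finset Int) := by
          simp only [List.mem_toFinset, List.mem_cons]
          rintro (rfl | hmem)
          · exact hmx rfl
          · exact hmx (le_antisymm (hp m rfl x (List.mem_cons_self)) (hxle m hmem))
        have hset : ((x :: xs).toFinset \ ({m} : Finset Int)) = insert x xs.toFinset := by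
          rw [Finset.sdiff_eq_self_of_disjoint (by simpa using hnm)]
          simp
        rw [hset, hins]
        ring

theorem sorted_toFinset (nums : List Int) :
    (PySem.List.sorted nums (fun x => x) false).toFinset = nums.toFinset := by
  ext y
  simp [List.mem_toFinset, PySem.List.mem_sorted]

-- ===== VERDICT (by name: the statement is the Claim_ definition above) =====
theorem solution_spec : Claim_equal_solution := by
  intro nums _
  unfold Spec_solution solution solution_alt
  have hA := solutionGo_len nums.length nums [] (by simp)
  simp only [List.length_nil, List.toFinset_nil, Finset.sdiff_empty, Nat.zero_add] at hA
  rw [hA]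
  have hB := solutionFold_count (PySem.List.sorted nums (fun x => x) false) 0 none
    (by simpa using PySem.List.sorted_pairwise nums (fun x => x))
    (by intro m hm; cases hm)
  simp only [Finset.sdiff_empty, zero_add, sorted_toFinset] at hB
  simp only []
  rw [hB]
  have hfd : PySem.Int.floordiv ((nums.length : Int) + 1) 2
      = (((nums.length + 1) / 2 : Nat) : Int) := by
    rw [show ((nums.length : Int) + 1) = ((nums.length + 1 : Nat) : Int) by push_cast; ring]
    exact_mod_cast PySem.Int.floordiv_natCast (nums.length + 1) 2
  rw [hfd, Nat.cast_min, min_comm]
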